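-- pv_equiv track=rewrite | github.com/Cyberisthename/chatbot | scripts/train_adapters.py | _extract_math_topics
-- ===== SOURCE A (Python) =====
-- from typing import Dict, List, Optional, Any, Tuple
--
-- def _extract_math_topics(content: str) -> List[str]:
--     """Extract mathematics-specific topics"""
--     topics = []
--     content_lower = content.lower()
--
--     if any(word in content_lower for word in ["algebra", "equation", "solve"]):
--         topics.append("algebra")
--     if any(word in content_lower for word in ["geometry", "angle", "triangle"]):
--         topics.append("geometry")
--     if any(word in content_lower for word in ["calculus", "derivative", "integral"]):
--         topics.append("calculus")
--     if any(word in content_lower for word in ["statistics", "mean", "average"]):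
--         topics.append("statistics")
--     if any(word in content_lower for word in ["probability", "chance", "random"]):
--         topics.append("probability")
--
--     return topics if topics else ["general_math"]
-- ===== SOURCE B (Python) =====
-- from typing import List
--
-- # keyword -> topic (naive multi-pattern scan over the text)
-- _KW = {
--     "algebra": "algebra", "equation": "algebra", "solve": "algebra",
--     "geometry": "geometry", "angle": "geometry", "triangle": "geometry",
--     "calculus": "calculus", "derivative": "calculus", "integral": "calculus",
--     "statistics": "statistics", "mean": "statistics", "average": "statistics",
--     "probability": "probability", "chance": "probability", "random": "probability",
-- }
--
-- _ORDER = ["algebra", "geometry", "calculus", "statistics", "probability"]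
--
-- def _extract_math_topics(content: str) -> List[str]:
--     cl = content.lower()
--     found = set()
--     for i in range(len(cl)):
--         for kw, topic in _KW.items():
--             if cl.startswith(kw, i):
--                 found.add(topic)
--     topics = [t for t in _ORDER if t in found]
--     return topics or ["general_math"]
-- ===== Notes on version B (the rewrite author's own statement) =====
-- stated objective: alternative
-- what changed: Instead of running a separate substring search per keyword, B scans the lowercased text once position by position like a naive multi-pattern matcher, collecting matched topics into a set, then emits topics in canonical order with the same ['general_math'] fallback.
import Mathlib
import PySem

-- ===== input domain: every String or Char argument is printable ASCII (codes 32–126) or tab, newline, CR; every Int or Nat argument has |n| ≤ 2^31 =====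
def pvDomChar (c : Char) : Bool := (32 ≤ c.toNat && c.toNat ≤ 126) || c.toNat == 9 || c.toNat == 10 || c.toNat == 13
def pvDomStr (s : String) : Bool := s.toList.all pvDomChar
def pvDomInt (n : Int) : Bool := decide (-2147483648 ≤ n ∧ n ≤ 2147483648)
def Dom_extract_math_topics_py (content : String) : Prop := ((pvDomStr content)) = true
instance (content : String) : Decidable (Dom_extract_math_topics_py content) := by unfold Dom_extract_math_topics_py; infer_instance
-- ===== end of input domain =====

-- B scans the lowercased text position by position like a naive multi-pattern matcher, collecting
-- matched topics into a set, then emits topics in canonical order (objective: alternative).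
-- ===== PORT A =====
def extract_math_topics_py (content : String) : List String :=
  let content_lower := PySem.Str.lower content
  let topics : List String := []
  let topics := if ["algebra", "equation", "solve"].any (fun w => PySem.Str.isIn w content_lower) then topics ++ ["algebra"] else topics
  let topics := if ["geometry", "angle", "triangle"].any (fun w => PySem.Str.isIn w content_lower) then topics ++ ["geometry"] else topics
  let topics := if ["calculus", "derivative", "integral"].any (fun w => PySem.Str.isIn w content_lower) then topics ++ ["calculus"] else topics
  let topics := if ["statistics", "mean", "average"].any (fun w => PySem.Str.isIn w content_lower) then topics ++ ["statistics"] else topics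
  let topics := if ["probability", "chance", "random"].any (fun w => PySem.Str.isIn w content_lower) then topics ++ ["probability"] else topics
  if topics = [] then ["general_math"] else topics

-- ===== PORT B =====
-- keyword -> topic table (Source B's _KW dict, in insertion order)
def pvKwTable : List (String × String) :=
  [("algebra", "algebra"), ("equation", "algebra"), ("solve", "algebra"),
   ("geometry", "geometry"), ("angle", "geometry"), ("triangle", "geometry"),
   ("calculus", "calculus"), ("derivative", "calculus"), ("integral", "calculus"),
   ("statistics", "statistics"), ("mean", "statistics"), ("average", "statistics"),
   ("probability", "probability"), ("chance", "probability"), ("random", "probability")]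

def pvOrder : List String := ["algebra", "geometry", "calculus", "statistics", "probability"]

-- Source B's `found` set: for i in range(len(cl)): for kw, topic in _KW.items(): if cl.startswith(kw, i): found.add(topic)
-- cl.startswith(kw, i) is ported by hand as Chars.startswith on the i-th suffix (exact: i ∈ [0, len) so i.toNat = i)
def pvFound (cl : String) : PySem.Set String :=
  (PySem.List.pyRange 0 (PySem.Str.len cl) 1).foldl (fun acc i =>
    pvKwTable.foldl (fun acc p =>
      if PySem.Chars.startswith (cl.toList.drop i.toNat) p.1.toList then PySem.Set.add acc p.2 else acc) acc)
    PySem.Set.empty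

def extract_math_topics_py_alt (content : String) : List String :=
  let cl := PySem.Str.lower content
  let found := pvFound cl
  let topics := pvOrder.filter (fun t => PySem.Set.contains found t)
  if topics = [] then ["general_math"] else topics

-- ===== PRECONDITION & SPEC =====
def Spec_extract_math_topics_py (content : String) (out : List String) : Prop := out = extract_math_topics_py_alt content
instance (content : String) (out : List String) : Decidable (Spec_extract_math_topics_py content out) := by unfold Spec_extract_math_topics_py; infer_instance

-- ===== CLAIM =====
def Claim_equal_extract_math_topics_py : Prop := ∀ (content : String), Dom_extract_math_topics_py content → Spec_extract_math_topics_py content (extract_math_topics_py content)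

-- ===== LEMMAS AND PROOFS =====

-- generic characterization of membership after a foldl whose step satisfies a membership law
theorem pv_mem_foldl {α β : Type} (l : List α) (g : List β → α → List β) (P : α → β → Prop)
    (h : ∀ s a x, x ∈ g s a ↔ x ∈ s ∨ P a x) :
    ∀ (s : List β) (x : β), x ∈ l.foldl g s ↔ x ∈ s ∨ ∃ a ∈ l, P a x := by
  induction l with
  | nil => intro s x; simp
  | cons a l ih =>
    intro s x
    simp only [List.foldl_cons, ih, h, List.mem_cons]
    constructor
    · rintro ((hx | hp) | ⟨b, hb, hpb⟩)
      · exact Or.inl hx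
      · exact Or.inr ⟨a, Or.inl rfl, hp⟩
      · exact Or.inr ⟨b, Or.inr hb, hpb⟩
    · rintro (hx | ⟨b, (rfl | hb), hpb⟩)
      · exact Or.inl (Or.inl hx)
      · exact Or.inl (Or.inr hpb)
      · exact Or.inr ⟨b, hb, hpb⟩

theorem pv_mem_inner (cl : String) (i : Int) (s : PySem.Set String) (x : String) :
    x ∈ pvKwTable.foldl (fun acc p =>
      if PySem.Chars.startswith (cl.toList.drop i.toNat) p.1.toList then PySem.Set.add acc p.2 else acc) s
    ↔ x ∈ s ∨ ∃ p ∈ pvKwTable, PySem.Chars.startswith (cl.toList.drop i.toNat) p.1.toList = true ∧ x = p.2 := by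
  apply pv_mem_foldl
  intro s p x
  split
  · rename_i hc
    simp [PySem.Set.mem_add, hc]
  · rename_i hc
    simp [hc]

theorem pv_mem_found (cl : String) (x : String) :
    x ∈ pvFound cl ↔ ∃ p ∈ pvKwTable, PySem.Str.isIn p.1 cl = true ∧ x = p.2 := by
  unfold pvFound
  rw [pv_mem_foldl _ _
      (fun i x => ∃ p ∈ pvKwTable, PySem.Chars.startswith (cl.toList.drop i.toNat) p.1.toList = true ∧ x = p.2)
      (fun s i x => pv_mem_inner cl i s x)]
  simp only [PySem.Set.empty, List.not_mem_nil, false_or]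
  constructor
  · rintro ⟨i, hi, p, hp, hsw, rfl⟩
    refine ⟨p, hp, ?_, rfl⟩
    rw [PySem.Str.isIn_iff_infix, ← PySem.Chars.isIn_iff_infix,
        ← PySem.Chars.exists_prefix_drop_iff_isIn]
    exact ⟨i.toNat, (PySem.Chars.startswith_iff _ _).1 hsw⟩
  · rintro ⟨p, hp, hin, rfl⟩
    have hne : p.1.toList ≠ [] := by
      fin_cases hp <;> decide
    rw [PySem.Str.isIn_iff_infix, ← PySem.Chars.isIn_iff_infix,
        ← PySem.Chars.exists_prefix_drop_iff_isIn] at hin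
    obtain ⟨j, hj⟩ := hin
    have hjlt : j < cl.toList.length := by
      by_contra hge
      push Not at hge
      rw [List.drop_eq_nil_of_le hge] at hj
      exact hne (List.prefix_nil.mp hj)
    refine ⟨(j : Int), ?_, p, hp, ?_, rfl⟩
    · rw [PySem.List.mem_pyRange_one]
      constructor
      · exact Int.natCast_nonneg j
      · rw [PySem.Str.len_eq]
        exact_mod_cast hjlt
    · rw [PySem.Chars.startswith_iff]
      simpa using hj

theorem pv_contains_found (cl t : String) :
    PySem.Set.contains (pvFound cl) t = true ↔ ∃ p ∈ pvKwTable, PySem.Str.isIn p.1 cl = true ∧ t = p.2 := by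
  simp only [PySem.Set.contains, List.contains_iff_mem, pv_mem_found]

-- ===== VERDICT =====
set_option maxHeartbeats 2000000 in
theorem extract_math_topics_py_spec : Claim_equal_extract_math_topics_py := by
  intro content _
  unfold Spec_extract_math_topics_py extract_math_topics_py extract_math_topics_py_alt
  set cl := PySem.Str.lower content with hcl
  have h1 : PySem.Set.contains (pvFound cl) "algebra"
      = (PySem.Str.isIn "algebra" cl || (PySem.Str.isIn "equation" cl || PySem.Str.isIn "solve" cl)) := by
    rw [Bool.eq_iff_iff, pv_contains_found]
    simp [pvKwTable]
  have h2 : PySem.Set.contains (pvFound cl) "geometry"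
      = (PySem.Str.isIn "geometry" cl || (PySem.Str.isIn "angle" cl || PySem.Str.isIn "triangle" cl)) := by
    rw [Bool.eq_iff_iff, pv_contains_found]
    simp [pvKwTable]
  have h3 : PySem.Set.contains (pvFound cl) "calculus"
      = (PySem.Str.isIn "calculus" cl || (PySem.Str.isIn "derivative" cl || PySem.Str.isIn "integral" cl)) := by
    rw [Bool.eq_iff_iff, pv_contains_found]
    simp [pvKwTable]
  have h4 : PySem.Set.contains (pvFound cl) "statistics"
      = (PySem.Str.isIn "statistics" cl || (PySem.Str.isIn "mean" cl || PySem.Str.isIn "average" cl)) := by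
    rw [Bool.eq_iff_iff, pv_contains_found]
    simp [pvKwTable]
  have h5 : PySem.Set.contains (pvFound cl) "probability"
      = (PySem.Str.isIn "probability" cl || (PySem.Str.isIn "chance" cl || PySem.Str.isIn "random" cl)) := by
    rw [Bool.eq_iff_iff, pv_contains_found]
    simp [pvKwTable]
  simp only [pvOrder, List.filter, h1, h2, h3, h4, h5, List.any_cons, List.any_nil, Bool.or_false]
  cases hb1 : (PySem.Str.isIn "algebra" cl || (PySem.Str.isIn "equation" cl || PySem.Str.isIn "solve" cl)) <;>
  cases hb2 : (PySem.Str.isIn "geometry" cl || (PySem.Str.isIn "angle" cl || PySem.Str.isIn "triangle" cl)) <;>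
  cases hb3 : (PySem.Str.isIn "calculus" cl || (PySem.Str.isIn "derivative" cl || PySem.Str.isIn "integral" cl)) <;>
  cases hb4 : (PySem.Str.isIn "statistics" cl || (PySem.Str.isIn "mean" cl || PySem.Str.isIn "average" cl)) <;>
  cases hb5 : (PySem.Str.isIn "probability" cl || (PySem.Str.isIn "chance" cl || PySem.Str.isIn "random" cl)) <;>
  simp
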